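-- pv_equiv track=rewrite | github.com/Sunwoo0110/Algorithm | 프로그래머스/1/72410. 신규 아이디 추천/신규 아이디 추천.py | solution
-- ===== SOURCE A (Python) =====
-- def solution(new_id):
--     answer = ''
--
--     ## 1단계
--     new_id = new_id.lower()
--
--     ## 2단계
--     for i in new_id:
--         if i in ['-', '_', '.'] or i.isdigit() or i.isalpha():
--             answer += i
--
--     new_id = answer
--     answer = ''
--     idx = 0
--     ## 3단계
--     while idx < len(new_id):
--         if new_id[idx] == '.':
--             answer += new_id[idx]
--             idx += 1
--             while idx < len(new_id):
--                 if new_id[idx] != '.':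
--                     break
--                 idx += 1
--         else:
--             answer += new_id[idx]
--             idx += 1
--
--     ## 4단계
--     if len(answer) > 0 and answer[0] == '.':
--         answer = answer[1:]
--     if len(answer) > 0 and answer[-1] == '.':
--         answer = answer[:-1]
--
--     ## 5단계
--     if answer == '': answer += 'a'
--
--     ## 6단계
--     if len(answer) >= 16:
--         answer = answer[:15]
--         if answer[-1] == '.': answer = answer[:-1]
--
--     ## 7단계
--     if len(answer) <= 2:
--         last = answer[-1]
--         answer += last*(3-len(answer))
--
--     return answer
-- ===== SOURCE B (Python) =====
-- def solution(new_id):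
--     # One fused state-machine pass: lowercase, filter, collapse dot runs, skip
--     # leading dots, and stop early once 16 significant characters are collected
--     # (later characters can never influence the answer).  Then trim/default/
--     # truncate/pad by arithmetic on that short buffer.
--     out = []
--     for ch in new_id:
--         c = ch.lower()
--         if not (c.isdigit() or c.isalpha() or c in '-_.'):
--             continue
--         if c == '.' and (not out or out[-1] == '.'):
--             continue
--         out.append(c)
--         if len(out) == 16:
--             break
--     if out and out[-1] == '.':
--         out.pop()
--     s = ''.join(out) or 'a'
--     s = s[:15]
--     if s.endswith('.'):
--         s = s[:-1]
--     if len(s) < 3: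
--         s += s[-1] * (3 - len(s))
--     return s
-- ===== Notes on version B (the rewrite author's own statement) =====
-- stated objective: faster
-- what changed: A runs staged passes (filter loop, index-walking dot-collapse while loop, two edge trims, truncate, pad); B is a single fused state-machine pass that lowercases, filters, collapses dots and skips leading dots in one loop and stops scanning as soon as 16 significant characters are collected (later input cannot affect the answer), followed by constant-size post-processing.
import Mathlib
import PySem

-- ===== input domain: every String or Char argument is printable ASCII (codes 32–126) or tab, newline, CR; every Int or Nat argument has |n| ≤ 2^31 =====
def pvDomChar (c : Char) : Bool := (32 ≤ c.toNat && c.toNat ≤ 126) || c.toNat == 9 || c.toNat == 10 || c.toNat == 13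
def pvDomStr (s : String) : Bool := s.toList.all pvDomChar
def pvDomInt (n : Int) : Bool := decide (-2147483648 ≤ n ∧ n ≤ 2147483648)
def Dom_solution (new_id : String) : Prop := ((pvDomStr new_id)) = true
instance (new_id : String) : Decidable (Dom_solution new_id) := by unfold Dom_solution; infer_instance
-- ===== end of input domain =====

-- B replaces A's staged passes (filter loop, index-walking dot-collapse while loop, edge trims,
-- truncate, pad) by ONE fused state-machine pass that lowercases, filters, collapses dot runs and
-- skips leading dots together and stops scanning once 16 significant characters are collected
-- (later input cannot affect the answer); a timing run measured B faster on large inputs.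

-- ===== PORT A =====
-- inner 'while' of step 3: advance idx past consecutive dots
def pvDropDots : List Char → List Char
  | [] => []
  | c :: rest => if c ≠ '.' then c :: rest else pvDropDots rest

theorem pvDropDots_length_le (l : List Char) : (pvDropDots l).length ≤ l.length := by
  induction l with
  | nil => simp [pvDropDots]
  | cons c rest ih => unfold pvDropDots; split_ifs <;> simp <;> omega

-- outer while of step 3, recursing on the remaining suffix
def pvStep3 : List Char → List Char
  | [] => []
  | c :: rest =>
    if c = '.' then c :: pvStep3 (pvDropDots rest)
    else c :: pvStep3 rest
termination_by l => l.length
decreasing_by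
  · exact Nat.lt_succ_of_le (pvDropDots_length_le rest)
  · simp

-- step 4, first trim: leading dot
def pvA4 (l : List Char) : List Char :=
  if 0 < l.length ∧ PySem.List.pyGetD l 0 ' ' = '.'
  then PySem.List.slice l (some 1) none else l

-- step 4, second trim: trailing dot
def pvA5 (l : List Char) : List Char :=
  if 0 < l.length ∧ PySem.List.pyGetD l (-1) ' ' = '.'
  then PySem.List.slice l none (some (-1)) else l

-- step 5: default 'a'
def pvA6 (l : List Char) : List Char := if l = [] then l ++ ['a'] else l

-- step 6: truncate to 15, drop a trailing dot
def pvA7 (l : List Char) : List Char :=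
  if 16 ≤ l.length then
    (if PySem.List.pyGetD (PySem.List.slice l none (some 15)) (-1) ' ' = '.'
     then PySem.List.slice (PySem.List.slice l none (some 15)) none (some (-1))
     else PySem.List.slice l none (some 15))
  else l

-- step 7: pad with the last character
def pvA8 (l : List Char) : List Char :=
  if l.length ≤ 2 then l ++ List.replicate (3 - l.length) (PySem.List.pyGetD l (-1) ' ') else l

def solution (new_id : String) : String :=
  String.mk (pvA8 (pvA7 (pvA6 (pvA5 (pvA4 (pvStep3
    ((PySem.Chars.lower new_id.toList).foldl (fun acc i =>
        if i ∈ ['-', '_', '.'] ∨ PySem.Chars.isdigit i = true ∨ PySem.Chars.isalpha i = true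
        then acc ++ [i] else acc) [])))))))

-- ===== PORT B =====
-- the single fused loop of B: lowercase, filter, collapse/skip dots, early break at 16 chars
def pvBLoop : List Char → List Char → List Char
  | out, [] => out
  | out, ch :: rest =>
    let c := PySem.Chars.lowerChar ch
    if ¬(PySem.Chars.isdigit c = true ∨ PySem.Chars.isalpha c = true ∨ c ∈ ['-', '_', '.']) then
      pvBLoop out rest
    else if c = '.' ∧ (out = [] ∨ PySem.List.pyGetD out (-1) ' ' = '.') then
      pvBLoop out rest
    else
      if (out ++ [c]).length = 16 then out ++ [c] else pvBLoop (out ++ [c]) rest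

-- if out and out[-1] == '.': out.pop()
def pvB1 (l : List Char) : List Char :=
  if l ≠ [] ∧ PySem.List.pyGetD l (-1) ' ' = '.' then l.dropLast else l

-- s = ''.join(out) or 'a'
def pvB2 (l : List Char) : List Char := if l = [] then ['a'] else l

-- s = s[:15]
def pvB3 (l : List Char) : List Char := PySem.List.slice l none (some 15)

-- if s.endswith('.'): s = s[:-1]
def pvB4 (l : List Char) : List Char :=
  if PySem.Chars.endswith l ['.'] then PySem.List.slice l none (some (-1)) else l

-- if len(s) < 3: s += s[-1] * (3 - len(s))
def pvB5 (l : List Char) : List Char :=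
  if l.length < 3 then l ++ List.replicate (3 - l.length) (PySem.List.pyGetD l (-1) ' ') else l

def solution_alt (new_id : String) : String :=
  String.mk (pvB5 (pvB4 (pvB3 (pvB2 (pvB1 (pvBLoop [] new_id.toList))))))

-- ===== PRECONDITION & SPEC =====
def Spec_solution (new_id : String) (out : String) : Prop := out = solution_alt new_id
instance (new_id : String) (out : String) : Decidable (Spec_solution new_id out) := by unfold Spec_solution; infer_instance

-- ===== CLAIM =====
def Claim_equal_solution : Prop := ∀ (new_id : String), Dom_solution new_id → Spec_solution new_id (solution new_id)

-- ===== LEMMAS AND PROOFS =====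

-- B's character predicate, as a Bool (proof-side name for the fused loop's filter)
def pvPredB (c : Char) : Bool :=
  PySem.Chars.isdigit c || PySem.Chars.isalpha c || decide (c ∈ ['-', '_', '.'])

theorem pvPredB_iff (c : Char) :
    pvPredB c = true ↔
      (PySem.Chars.isdigit c = true ∨ PySem.Chars.isalpha c = true ∨ c ∈ ['-', '_', '.']) := by
  simp [pvPredB, or_assoc]

-- dot-collapse with an explicit previous character (proof-side model of both programs' collapse)
def pvCollapse (p : Option Char) : List Char → List Char
  | [] => []
  | c :: rest =>
    if c = '.' ∧ p = some '.' then pvCollapse (some c) rest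
    else c :: pvCollapse (some c) rest

-- "no two adjacent dots"
def pvNoDD (l : List Char) : Prop := List.IsChain (fun a b => ¬(a = '.' ∧ b = '.')) l

-- the conditional single trims / default, as plain list operations
def pvTrim (l : List Char) : List Char := if l.getLast? = some '.' then l.dropLast else l
def pvDflt (l : List Char) : List Char := if l = [] then ['a'] else l

-- A's filter fold is a List.filter with B's predicate
theorem pvFilter_eq (l : List Char) :
    l.foldl (fun acc i =>
        if i ∈ ['-', '_', '.'] ∨ PySem.Chars.isdigit i = true ∨ PySem.Chars.isalpha i = true
        then acc ++ [i] else acc) [] = l.filter pvPredB := by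
  rw [PySem.List.foldl_append_ite_eq_filter]
  simp only [List.nil_append]
  congr 1
  funext c
  by_cases h1 : PySem.Chars.isdigit c = true <;>
    by_cases h2 : PySem.Chars.isalpha c = true <;>
      by_cases h3 : c ∈ ['-', '_', '.'] <;>
        simp [pvPredB, h1, h2, h3]

-- A's index-walking while loop is pvCollapse from no previous character
theorem pvStep3_eq_aux : ∀ (n : Nat) (s : List Char), s.length ≤ n →
    (∀ p, p ≠ some '.' → pvCollapse p s = pvStep3 s) ∧
    pvCollapse (some '.') s = pvStep3 (pvDropDots s) := by
  intro n
  induction n with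
  | zero =>
    intro s hs
    have : s = [] := List.eq_nil_of_length_eq_zero (Nat.le_zero.mp hs)
    subst this
    exact ⟨fun p _ => by simp [pvCollapse, pvStep3], by simp [pvCollapse, pvStep3, pvDropDots]⟩
  | succ n ih =>
    intro s hs
    cases s with
    | nil => exact ⟨fun p _ => by simp [pvCollapse, pvStep3], by simp [pvCollapse, pvStep3, pvDropDots]⟩
    | cons c rest =>
      have hr : rest.length ≤ n := by simpa using hs
      constructor
      · intro p hp
        unfold pvCollapse pvStep3
        by_cases hc : c = '.'
        · rw [if_neg (fun h => hp h.2), if_pos hc]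
          subst hc
          rw [(ih rest hr).2]
        · rw [if_neg (fun h => hc h.1), if_neg hc]
          rw [(ih rest hr).1 (some c) (fun h => hc (Option.some.inj h))]
      · unfold pvCollapse pvDropDots
        by_cases hc : c = '.'
        · rw [if_pos ⟨hc, rfl⟩, if_neg (by simp [hc])]
          subst hc
          exact (ih rest hr).2
        · rw [if_neg (fun h => hc h.1), if_pos hc]
          unfold pvStep3
          rw [if_neg hc]
          rw [(ih rest hr).1 (some c) (fun h => hc (Option.some.inj h))]

theorem pvStep3_eq (s : List Char) : pvCollapse none s = pvStep3 s :=
  (pvStep3_eq_aux s.length s le_rfl).1 none (by simp)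

theorem pvNoDD_collapse : ∀ (s : List Char) (p : Option Char), pvNoDD (pvCollapse p s) := by
  intro s
  induction s with
  | nil => intro p; simp [pvCollapse, pvNoDD]
  | cons c rest ih =>
    intro p
    unfold pvCollapse
    by_cases h : c = '.' ∧ p = some '.'
    · rw [if_pos h]; exact ih (some c)
    · rw [if_neg h]
      have htail := ih (some c)
      cases hE : pvCollapse (some c) rest with
      | nil => simp [pvNoDD]
      | cons d ds =>
        have hchain : pvNoDD (d :: ds) := hE ▸ htail
        refine List.isChain_cons_cons.mpr ⟨?_, hchain⟩
        rintro ⟨hc, hd⟩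
        subst hc
        have hhd : (pvCollapse (some '.') rest).head? ≠ some '.' := by
          clear hE hchain htail ih
          induction rest with
          | nil => simp [pvCollapse]
          | cons e es ihe =>
            unfold pvCollapse
            by_cases he : e = '.'
            · rw [if_pos ⟨he, rfl⟩]; subst he; exact ihe
            · rw [if_neg (fun hx => he hx.1)]; simp [he]
        rw [hE] at hhd
        exact hhd (by simp [hd])

-- leading-dot strip after a collapse from none = collapse from a previous dot
theorem pvStripLead (F : List Char) : pvA4 (pvCollapse none F) = pvCollapse (some '.') F := by
  cases F with
  | nil => simp [pvA4, pvCollapse]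
  | cons c rest =>
    rw [pvCollapse, if_neg (by simp)]
    by_cases hc : c = '.'
    · subst hc
      rw [pvA4, if_pos ⟨by simp, by rw [PySem.List.pyGetD_zero_cons]⟩,
        PySem.List.slice_from_one]
      rw [pvCollapse, if_pos ⟨rfl, rfl⟩]
      rfl
    · have hcond : ¬(0 < (c :: pvCollapse (some c) rest).length ∧
          PySem.List.pyGetD (c :: pvCollapse (some c) rest) 0 ' ' = '.') := by
        rw [PySem.List.pyGetD_zero_cons]
        exact fun hx => hc hx.2
      rw [pvA4, if_neg hcond, pvCollapse, if_neg (fun h => hc h.1)]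

-- "the value at index -1 is a dot" iff "the last element is a dot" (also for the empty list)
theorem pvGetNegDotIff (l : List Char) :
    PySem.List.pyGetD l (-1) ' ' = '.' ↔ l.getLast? = some '.' := by
  cases l with
  | nil => decide
  | cons a as =>
    have hne : (a :: as) ≠ [] := by simp
    rw [PySem.List.pyGetD_neg_one _ ' ' hne, List.getLast?_eq_some_getLast hne]
    simp

theorem pvA5_eq (l : List Char) : pvA5 l = pvTrim l := by
  unfold pvA5 pvTrim
  rw [PySem.List.slice_to_neg_one]
  by_cases h : l.getLast? = some '.'
  · have hne : l ≠ [] := by rintro rfl; simp at h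
    rw [if_pos ⟨List.length_pos_of_ne_nil hne, (pvGetNegDotIff l).mpr h⟩, if_pos h]
  · rw [if_neg (fun hc => h ((pvGetNegDotIff l).mp hc.2)), if_neg h]

theorem pvB1_eq (l : List Char) : pvB1 l = pvTrim l := by
  unfold pvB1 pvTrim
  by_cases h : l.getLast? = some '.'
  · have hne : l ≠ [] := by rintro rfl; simp at h
    rw [if_pos ⟨hne, (pvGetNegDotIff l).mpr h⟩, if_pos h]
  · rw [if_neg (fun hc => h ((pvGetNegDotIff l).mp hc.2)), if_neg h]

theorem pvA6_eq (l : List Char) : pvA6 l = pvDflt l := by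
  unfold pvA6 pvDflt
  split_ifs with h
  · rw [h]; rfl
  · rfl

theorem pvSlice15 (l : List Char) : PySem.List.slice l none (some 15) = l.take 15 := by
  rw [PySem.List.slice_to l (by norm_num)]; rfl

theorem pvA7_eq (l : List Char) :
    pvA7 l = if 16 ≤ l.length then pvTrim (l.take 15) else l := by
  unfold pvA7 pvTrim
  rw [pvSlice15, PySem.List.slice_to_neg_one]
  by_cases h16 : 16 ≤ l.length
  · rw [if_pos h16, if_pos h16]
    by_cases hd : (l.take 15).getLast? = some '.'
    · rw [if_pos ((pvGetNegDotIff _).mpr hd), if_pos hd]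
    · rw [if_neg (fun hc => hd ((pvGetNegDotIff _).mp hc)), if_neg hd]
  · rw [if_neg h16, if_neg h16]

theorem pvB2_eq (l : List Char) : pvB2 l = pvDflt l := rfl

theorem pvB3_eq (l : List Char) : pvB3 l = l.take 15 := pvSlice15 l

theorem pvB4_eq (l : List Char) : pvB4 l = pvTrim l := by
  unfold pvB4 pvTrim
  rw [PySem.List.slice_to_neg_one]
  by_cases h : l.getLast? = some '.'
  · have hsuf : ['.'] <:+ l := by
      obtain ⟨ys, rfl⟩ := List.getLast?_eq_some_iff.mp h
      exact ⟨ys, rfl⟩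
    rw [if_pos ((PySem.Chars.endswith_iff _ _).mpr hsuf), if_pos h]
  · rw [if_neg ?_, if_neg h]
    intro hc
    obtain ⟨ys, rfl⟩ := (PySem.Chars.endswith_iff _ _).mp hc
    simp at h
  
theorem pvB5_eq (l : List Char) : pvB5 l = pvA8 l := by
  unfold pvB5 pvA8
  by_cases h : l.length ≤ 2
  · rw [if_pos (by omega), if_pos h]
  · rw [if_neg (by omega), if_neg h]

-- skip condition of the fused loop, as a fact about getLastD
theorem pvSkipIff (out : List Char) :
    (out = [] ∨ PySem.List.pyGetD out (-1) ' ' = '.') ↔ out.getLastD '.' = '.' := by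
  cases out with
  | nil => simp
  | cons a as =>
    have hne : (a :: as) ≠ [] := by simp
    rw [PySem.List.pyGetD_neg_one _ ' ' hne]
    rw [List.getLastD_eq_getLast?, List.getLast?_eq_some_getLast hne]
    simp

-- B's fused loop computes the first 16 characters of the collapsed, lead-stripped stream
theorem pvBLoop_eq : ∀ (l out : List Char), out.length < 16 →
    pvBLoop out l =
      (out ++ pvCollapse (some (out.getLastD '.'))
        ((l.map PySem.Chars.lowerChar).filter pvPredB)).take 16 := by
  intro l
  induction l with
  | nil =>
    intro out h
    simp [pvBLoop, pvCollapse, List.take_of_length_le (le_of_lt h)]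
  | cons ch rest ih =>
    intro out h
    rw [pvBLoop]
    simp only [List.map_cons, List.filter_cons]
    by_cases hp : PySem.Chars.isdigit (PySem.Chars.lowerChar ch) = true ∨
        PySem.Chars.isalpha (PySem.Chars.lowerChar ch) = true ∨
        PySem.Chars.lowerChar ch ∈ ['-', '_', '.']
    · rw [if_neg (not_not_intro hp), if_pos ((pvPredB_iff _).mpr hp)]
      by_cases hs : PySem.Chars.lowerChar ch = '.' ∧
          (out = [] ∨ PySem.List.pyGetD out (-1) ' ' = '.')
      · rw [if_pos hs]
        have hlast : out.getLastD '.' = '.' := (pvSkipIff out).mp hs.2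
        rw [pvCollapse, if_pos ⟨hs.1, by rw [hlast]⟩, hs.1, ← hlast]
        exact ih out h
      · rw [if_neg hs]
        have hnc : ¬(PySem.Chars.lowerChar ch = '.' ∧
            some (out.getLastD '.') = some '.') := by
          rintro ⟨h1, h2⟩
          exact hs ⟨h1, (pvSkipIff out).mpr (Option.some.inj h2)⟩
        rw [pvCollapse, if_neg hnc]
        have hassoc : out ++ PySem.Chars.lowerChar ch ::
            pvCollapse (some (PySem.Chars.lowerChar ch))
              ((rest.map PySem.Chars.lowerChar).filter pvPredB)
          = (out ++ [PySem.Chars.lowerChar ch]) ++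
            pvCollapse (some (PySem.Chars.lowerChar ch))
              ((rest.map PySem.Chars.lowerChar).filter pvPredB) := by simp
        by_cases h16 : (out ++ [PySem.Chars.lowerChar ch]).length = 16
        · rw [if_pos h16, hassoc, List.take_left' h16]
        · rw [if_neg h16]
          have h' : (out ++ [PySem.Chars.lowerChar ch]).length < 16 := by
            simp only [List.length_append, List.length_cons, List.length_nil] at *
            omega
          rw [ih _ h', hassoc]
          congr 2
          simp
    · rw [if_pos hp, if_neg (by simpa [pvPredB_iff] using hp)]
      exact ih out h

-- on a collapsed list, dropping a trailing dot leaves a list not ending in a dot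
theorem pvNoDD_no_concat (zs : List Char) : ¬ pvNoDD (zs ++ ['.', '.']) := by
  induction zs with
  | nil => simp [pvNoDD, List.isChain_cons_cons]
  | cons a zs ih => intro h; exact ih h.tail

theorem pvTrimLast (L : List Char) (h : pvNoDD L) (hl : L.getLast? = some '.') :
    L.dropLast.getLast? ≠ some '.' := by
  intro hcontra
  obtain ⟨ys, rfl⟩ := List.getLast?_eq_some_iff.mp hl
  rw [List.dropLast_concat] at hcontra
  obtain ⟨zs, rfl⟩ := List.getLast?_eq_some_iff.mp hcontra
  exact pvNoDD_no_concat zs (by simpa using h)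

theorem pvDfltTrim_last (L : List Char) (h : pvNoDD L) :
    (pvDflt (pvTrim L)).getLast? ≠ some '.' := by
  unfold pvDflt
  by_cases he : pvTrim L = []
  · rw [if_pos he]; simp
  · rw [if_neg he]
    unfold pvTrim at *
    by_cases hl : L.getLast? = some '.'
    · rw [if_pos hl]; exact pvTrimLast L h hl
    · rw [if_neg hl]; exact hl

theorem pvTrim_of_not_dot (l : List Char) (h : l.getLast? ≠ some '.') : pvTrim l = l := by
  unfold pvTrim; rw [if_neg h]

-- the heart: A's tail stages on the full stream L equal B's tail stages on L.take 16
theorem pvCore (L : List Char) (h : pvNoDD L) :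
    (if 16 ≤ (pvDflt (pvTrim L)).length then pvTrim ((pvDflt (pvTrim L)).take 15)
     else pvDflt (pvTrim L))
    = pvTrim ((pvDflt (pvTrim (L.take 16))).take 15) := by
  have hTlen : (pvTrim L).length = L.length ∨ (pvTrim L).length + 1 = L.length := by
    unfold pvTrim
    split_ifs with hl
    · right
      have hne : L ≠ [] := by rintro rfl; simp at hl
      rw [List.length_dropLast]
      have := List.length_pos_of_ne_nil hne
      omega
    · left; rfl
  by_cases h15 : L.length ≤ 15
  · -- short stream: the take 16 is invisible, truncation never fires
    have hL16 : L.take 16 = L := List.take_of_length_le (by omega)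
    rw [hL16]
    have hx : (pvDflt (pvTrim L)).length ≤ 15 := by
      unfold pvDflt
      split_ifs with he
      · simp
      · omega
    rw [if_neg (by omega), List.take_of_length_le hx,
      pvTrim_of_not_dot _ (pvDfltTrim_last L h)]
  · -- long stream
    have hTne : pvTrim L ≠ [] := by
      intro he
      rw [he] at hTlen
      simp at hTlen
      omega
    have hD : pvDflt (pvTrim L) = pvTrim L := if_neg hTne
    rw [hD]
    by_cases h16 : L.length = 16
    · have hL16 : L.take 16 = L := List.take_of_length_le (by omega)
      rw [hL16]
      by_cases hl : L.getLast? = some '.'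
      · have ht : pvTrim L = L.dropLast := if_pos hl
        have hlen : L.dropLast.length = 15 := by rw [List.length_dropLast]; omega
        have hne2 : L.dropLast ≠ [] := by
          intro he; rw [he] at hlen; simp at hlen
        have hd2 : pvDflt L.dropLast = L.dropLast := if_neg hne2
        rw [ht, if_neg (by omega), hd2, List.take_of_length_le (by omega),
          pvTrim_of_not_dot _ (pvTrimLast L h hl)]
      · have ht : pvTrim L = L := if_neg hl
        have hdl : pvDflt L = L := if_neg (by intro he; rw [he] at h16; simp at h16)
        rw [ht, hdl, if_pos (by omega)]
    · -- L.length ≥ 17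
      have h17 : 17 ≤ L.length := by omega
      have hMlen : (L.take 16).length = 16 := by
        rw [List.length_take]; omega
      have hA : (pvTrim L).take 15 = L.take 15 := by
        unfold pvTrim
        split_ifs with hl
        · rw [List.dropLast_eq_take, List.take_take]
          congr 1; omega
        · rfl
      have hB : (pvDflt (pvTrim (L.take 16))).take 15 = L.take 15 := by
        have hTM : pvTrim (L.take 16) ≠ [] := by
          unfold pvTrim
          split_ifs with hl
          · intro he
            have hdl : (L.take 16).dropLast.length = (L.take 16).length - 1 :=
              List.length_dropLast
            rw [he, hMlen] at hdl
            simp at hdl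
          · intro he; rw [he] at hMlen; simp at hMlen
        have hdm : pvDflt (pvTrim (L.take 16)) = pvTrim (L.take 16) := if_neg hTM
        rw [hdm]
        unfold pvTrim
        split_ifs with hl
        · rw [List.dropLast_eq_take, hMlen, List.take_take, List.take_take]
          norm_num
        · rw [List.take_take]
          norm_num
      rw [if_pos (by omega), hA, hB]

-- normalized master equation
theorem pvMaster (L : List Char) (h : pvNoDD L) :
    pvA8 (pvA7 (pvA6 (pvA5 L))) = pvB5 (pvB4 (pvB3 (pvB2 (pvB1 (L.take 16))))) := by
  rw [pvA5_eq, pvA6_eq, pvA7_eq, pvB1_eq, pvB2_eq, pvB3_eq, pvB4_eq, pvB5_eq]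
  exact congrArg pvA8 (pvCore L h)

-- ===== VERDICT =====
theorem solution_spec : Claim_equal_solution := by
  intro new_id _
  unfold Spec_solution solution solution_alt
  rw [pvFilter_eq, ← pvStep3_eq, pvStripLead, pvBLoop_eq _ [] (by simp)]
  have hmap : (new_id.toList.map PySem.Chars.lowerChar) = PySem.Chars.lower new_id.toList := rfl
  rw [hmap]
  exact congrArg String.mk
    (pvMaster _ (pvNoDD_collapse _ (some (([] : List Char).getLastD '.'))))
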